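-- pv_equiv track=rewrite | github.com/Zhuifeng414/leetcode | zuoshen_study/classic/Code_03_NumOfTree.py | dps
-- ===== SOURCE A (Python) =====
-- def dps(n):
--     if n == 0:
--         return 1
--     if n <= 2:
--         return n
--
--     dp = [0 for i in range(n+1)]
--
--     dp[0] = 1
--     dp[1] = 1
--     dp[2] = 2
--
--     for i in range(3, n+1):
--         for j in range(1, i):
--             dp[i] += dp[j] * dp[i - j]
--     return dp[n]
-- ===== SOURCE B (Python) =====
-- def dps(n):
--     # O(n): P-recursive two-term recurrence derived from the generating
--     # function B = (1 - sqrt(1 - 4x - 4x^2))/2 of the convolution sequence: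
--     # (k+1)*a(k+1) = (4k-2)*a(k) + (4k-8)*a(k-1), a(1)=1, a(2)=2.
--     if n == 0:
--         return 1
--     if n <= 2:
--         return n
--     a, b = 1, 2  # a = dps(k-1), b = dps(k) for k = 2
--     for k in range(2, n):
--         a, b = b, ((4 * k - 2) * b + (4 * k - 8) * a) // (k + 1)
--     return b
-- ===== Notes on version B (the rewrite author's own statement) =====
-- stated objective: faster
-- what changed: Replaced the O(n^2) convolution DP (dp[i] = sum dp[j]*dp[i-j]) by the linear two-term P-recursive recurrence (k+1)a(k+1) = (4k-2)a(k) + (4k-8)a(k-1) obtained from the algebraic generating function B = (1-sqrt(1-4x-4x^2))/2, keeping only the last two values.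
import Mathlib
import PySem

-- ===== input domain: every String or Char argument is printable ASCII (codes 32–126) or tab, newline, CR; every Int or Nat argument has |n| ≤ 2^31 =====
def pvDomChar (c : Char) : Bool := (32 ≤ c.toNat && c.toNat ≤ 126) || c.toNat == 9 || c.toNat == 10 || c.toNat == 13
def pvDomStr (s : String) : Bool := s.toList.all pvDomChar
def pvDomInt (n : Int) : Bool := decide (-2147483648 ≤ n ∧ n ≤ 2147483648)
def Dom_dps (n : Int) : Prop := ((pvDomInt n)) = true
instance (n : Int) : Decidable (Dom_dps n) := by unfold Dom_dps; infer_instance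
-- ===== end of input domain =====

-- B replaces A's O(n^2) convolution DP by the O(n) two-term P-recursive recurrence
-- (k+1)·a(k+1) = (4k-2)·a(k) + (4k-8)·a(k-1) of the same sequence (faster: asymptotic).


-- ===== PORT A =====
-- Literal transliteration of A: dp = [0]*(n+1); dp[0..2] seeded; nested loops
-- dp[i] += dp[j]*dp[i-j]. pyGetD/pySetD are the total forms of dp[...] — every
-- index used here (0, 1, 2, j, i-j, i, n with 0 ≤ · ≤ n < len dp) is in range,
-- so they are exact (Python raises on none of these inputs; A is total).
def dps (n : Int) : Int :=
  if n = 0 then 1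
  else if n ≤ 2 then n
  else
    let dp0 : List Int := (PySem.List.pyRange 0 (n+1) 1).map (fun _ => 0)
    let dp1 := PySem.List.pySetD dp0 0 1
    let dp2 := PySem.List.pySetD dp1 1 1
    let dp3 := PySem.List.pySetD dp2 2 2
    let dpF := (PySem.List.pyRange 3 (n+1) 1).foldl
      (fun dp i =>
        (PySem.List.pyRange 1 i 1).foldl
          (fun dp j => PySem.List.pySetD dp i
            (PySem.List.pyGetD dp i 0 + PySem.List.pyGetD dp j 0 * PySem.List.pyGetD dp (i-j) 0))
          dp)
      dp3
    PySem.List.pyGetD dpF n 0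

-- ===== PORT B =====
-- Literal transliteration of B (Source B): a, b = 1, 2; for k in range(2, n):
--   a, b = b, ((4k-2)*b + (4k-8)*a) // (k+1); return b.
def dps_alt (n : Int) : Int :=
  if n = 0 then 1
  else if n ≤ 2 then n
  else
    ((PySem.List.pyRange 2 n 1).foldl
      (fun st k => (st.2, PySem.Int.floordiv ((4*k-2)*st.2 + (4*k-8)*st.1) (k+1)))
      ((1 : Int), (2 : Int))).2

-- ===== PRECONDITION & SPEC =====
def Spec_dps (n : Int) (out : Int) : Prop := out = dps_alt n
instance (n : Int) (out : Int) : Decidable (Spec_dps n out) := by unfold Spec_dps; infer_instance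

-- ===== CLAIM (what is proved, stated in full; the proofs are below) =====
def Claim_equal_dps : Prop := ∀ (n : Int), Dom_dps n → Spec_dps n (dps n)

-- ===== LEMMAS AND PROOFS =====

-- The mathematical sequence both programs compute: a(0)=1, a(1)=1, a(2)=2,
-- a(m) = Σ_{j=1}^{m-1} a(j)·a(m-j) for m ≥ 3.
def seqA : Nat → Int
  | 0 => 1
  | 1 => 1
  | 2 => 2
  | (m+3) =>
    ((List.range (m+2)).attach.map (fun j => seqA (j.1+1) * seqA (m+2-j.1))).sum
decreasing_by
  · have := List.mem_range.mp j.2; omega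
  · omega

def convS (m : Nat) : Int := ∑ j ∈ Finset.range m, seqA (j+1) * seqA (m-j)
def wconvS (m : Nat) : Int := ∑ j ∈ Finset.range m, ((j:Int)+1) * (seqA (j+1) * seqA (m-j))

theorem seqA_succ3 (m : Nat) : seqA (m+3) = convS (m+2) := by
  rw [seqA]
  simp only [List.map_attach_eq_pmap, List.pmap_eq_map]
  rfl

theorem seqA_zero : seqA 0 = 1 := by simp [seqA]
theorem seqA_one : seqA 1 = 1 := by simp [seqA]
theorem seqA_two : seqA 2 = 2 := by simp [seqA]

-- reflection symmetry of the convolution: 2·Σ (j+1)·t_j = (m+1)·Σ t_j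
theorem two_wconv (m : Nat) : 2 * wconvS m = ((m:Int)+1) * convS m := by
  have h := Finset.sum_range_reflect (fun j => ((j:Int)+1) * (seqA (j+1) * seqA (m-j))) m
  unfold wconvS convS
  conv_rhs => rw [Finset.mul_sum]
  rw [two_mul]
  nth_rewrite 1 [← h]
  rw [← Finset.sum_add_distrib]
  apply Finset.sum_congr rfl
  intro j hj
  have hj' := Finset.mem_range.mp hj
  have e1 : m-1-j+1 = m-j := by omega
  have e2 : m-(m-1-j) = j+1 := by omega
  have e3 : ((m-1-j : Nat):Int) = (m:Int)-1-(j:Int) := by omega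
  rw [e1, e2, e3]
  ring

theorem seqA_three : seqA 3 = 4 := by
  rw [show (3:Nat) = 0+3 from rfl, seqA_succ3]
  simp [convS, Finset.sum_range_succ, seqA_one, seqA_two]

theorem seqA_four : seqA 4 = 12 := by
  rw [show (4:Nat) = 1+3 from rfl, seqA_succ3]
  simp [convS, Finset.sum_range_succ, seqA_one, seqA_two, seqA_three]

theorem wconv_peel2 (k : Nat) : wconvS (k+4) = seqA (k+4) + 4*seqA (k+3)
    + ∑ j ∈ Finset.range (k+2), ((j:Int)+3)*(seqA (j+3) * seqA (k+2-j)) := by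
  unfold wconvS
  rw [show k+4 = (k+3)+1 from rfl, Finset.sum_range_succ' _ (k+3),
      show k+3 = (k+2)+1 from rfl, Finset.sum_range_succ' _ (k+2)]
  have h1 : ∀ j ∈ Finset.range (k+2),
      ((((j+1+1:Nat)):Int)+1) * (seqA (j+1+1+1) * seqA (k+2+1+1-(j+1+1)))
      = ((j:Int)+3)*(seqA (j+3) * seqA (k+2-j)) := by
    intro j hj
    have e : k+2+1+1-(j+1+1) = k+2-j := by omega
    rw [e]; push_cast; ring_nf
  rw [Finset.sum_congr rfl h1]
  simp [seqA_one, seqA_two]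
  ring

theorem wconv_peel1 (k : Nat) : wconvS (k+3) = seqA (k+3)
    + ∑ j ∈ Finset.range (k+2), ((j:Int)+2)*(seqA (j+2) * seqA (k+2-j)) := by
  unfold wconvS
  rw [show k+3 = (k+2)+1 from rfl, Finset.sum_range_succ' _ (k+2)]
  have h1 : ∀ j ∈ Finset.range (k+2),
      ((((j+1:Nat)):Int)+1) * (seqA (j+1+1) * seqA (k+2+1-(j+1)))
      = ((j:Int)+2)*(seqA (j+2) * seqA (k+2-j)) := by
    intro j hj
    have e : k+2+1-(j+1) = k+2-j := by omega
    rw [e]; push_cast; ring_nf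
  rw [Finset.sum_congr rfl h1]
  simp [seqA_one]
  ring

theorem conv_peel1 (k : Nat) : convS (k+3) = seqA (k+3)
    + ∑ j ∈ Finset.range (k+2), seqA (j+2) * seqA (k+2-j) := by
  unfold convS
  rw [show k+3 = (k+2)+1 from rfl, Finset.sum_range_succ' _ (k+2)]
  have h1 : ∀ j ∈ Finset.range (k+2),
      seqA (j+1+1) * seqA (k+2+1-(j+1)) = seqA (j+2) * seqA (k+2-j) := by
    intro j hj
    have e : k+2+1-(j+1) = k+2-j := by omega
    rw [e]
  rw [Finset.sum_congr rfl h1]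
  simp [seqA_one]
  ring

-- the P-recursive law of the sequence (GF: B = (1-√(1-4x-4x²))/2)
theorem seqA_rec : ∀ m : Nat, ((m:Int)+3) * seqA (m+3) = (4*(m:Int)+6) * seqA (m+2) + (4*(m:Int)) * seqA (m+1) := by
  intro m
  induction m using Nat.strong_induction_on with
  | _ m IH =>
    match m with
    | 0 => norm_num [seqA_three, seqA_two, seqA_one]
    | 1 => norm_num [seqA_four, seqA_three, seqA_two]
    | (k+2) =>
      have hIH : ∀ j ∈ Finset.range (k+2), ((j:Int)+3)*(seqA (j+3) * seqA (k+2-j))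
          = (4*(j:Int)+6)*(seqA (j+2) * seqA (k+2-j)) + (4*(j:Int))*(seqA (j+1) * seqA (k+2-j)) := by
        intro j hj
        have h := IH j (by have := Finset.mem_range.mp hj; omega)
        linear_combination (seqA (k+2-j)) * h
      have hW4 := wconv_peel2 k
      rw [Finset.sum_congr rfl hIH, Finset.sum_add_distrib] at hW4
      have hS1 : ∑ j ∈ Finset.range (k+2), (4*(j:Int)+6)*(seqA (j+2) * seqA (k+2-j))
          = 4 * (∑ j ∈ Finset.range (k+2), ((j:Int)+2)*(seqA (j+2) * seqA (k+2-j)))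
            - 2 * (∑ j ∈ Finset.range (k+2), seqA (j+2) * seqA (k+2-j)) := by
        rw [Finset.mul_sum, Finset.mul_sum, ← Finset.sum_sub_distrib]
        apply Finset.sum_congr rfl; intro j hj; ring
      have hS2 : ∑ j ∈ Finset.range (k+2), (4*(j:Int))*(seqA (j+1) * seqA (k+2-j))
          = 4 * wconvS (k+2) - 4 * convS (k+2) := by
        unfold wconvS convS
        rw [Finset.mul_sum, Finset.mul_sum, ← Finset.sum_sub_distrib]
        apply Finset.sum_congr rfl; intro j hj; ring
      have hW3 := wconv_peel1 k
      have hC3 := conv_peel1 k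
      have ht2 := two_wconv (k+2)
      have ht3 := two_wconv (k+3)
      have ht4 := two_wconv (k+4)
      have hc2 : convS (k+2) = seqA (k+3) := (seqA_succ3 k).symm
      have hc3 : convS (k+3) = seqA (k+4) := (seqA_succ3 (k+1)).symm
      have hc4 : convS (k+4) = seqA (k+5) := (seqA_succ3 (k+2)).symm
      show ((((k+2:Nat)):Int)+3) * seqA (k+5) = (4*(((k+2:Nat)):Int)+6) * seqA (k+4) + (4*(((k+2:Nat)):Int)) * seqA (k+3)
      push_cast
      push_cast at ht2 ht3 ht4
      linear_combination (-((k:Int)+5))*hc4 - ht4 + 2*hW4 + 2*hS1 + 2*hS2 - 8*hW3 + 4*hC3 + 4*ht3 + 4*ht2 + (4*(k:Int)+12)*hc3 + (4*(k:Int)+4)*hc2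

-- ===== A-side: the DP table holds seqA =====

theorem pyGetD_prefix (N : Nat) (c : Int) (R : List Int) (k : Int) (h0 : 0 ≤ k) (hk : k < (N:Int)) :
    PySem.List.pyGetD ((List.range N).map seqA ++ c :: R) k 0 = seqA k.toNat := by
  rw [PySem.List.pyGetD_eq_getElem _ _ h0 (by simp; omega)]
  rw [List.getElem_append_left (by simp; omega)]
  simp

theorem pyGetD_mid (N : Nat) (c : Int) (R : List Int) (i : Int) (h0 : 0 ≤ i) (hN : i.toNat = N) :
    PySem.List.pyGetD ((List.range N).map seqA ++ c :: R) i 0 = c := by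
  rw [PySem.List.pyGetD_eq_getElem _ _ h0 (by simp; omega)]
  rw [List.getElem_append_right (by simp; omega)]
  simp [hN]

theorem pySetD_mid (N : Nat) (c v : Int) (R : List Int) (i : Int) (h0 : 0 ≤ i) (hN : i.toNat = N) :
    PySem.List.pySetD ((List.range N).map seqA ++ c :: R) i v = (List.range N).map seqA ++ v :: R := by
  rw [PySem.List.pySetD_of_nonneg _ _ h0, hN]
  nth_rewrite 2 [show N = ((List.range N).map seqA).length from by simp]
  rw [List.set_append_right _ _ (le_refl _)]
  simp

theorem inner_loop (i : Int) (hi : 3 ≤ i) (R : List Int) :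
    ∀ (d : Nat) (jlo c : Int), 1 ≤ jlo → jlo ≤ i → (i - jlo).toNat = d →
    (PySem.List.pyRange jlo i 1).foldl
      (fun dp j => PySem.List.pySetD dp i
        (PySem.List.pyGetD dp i 0 + PySem.List.pyGetD dp j 0 * PySem.List.pyGetD dp (i-j) 0))
      ((List.range i.toNat).map seqA ++ c :: R)
    = (List.range i.toNat).map seqA ++ (c + ∑ j ∈ Finset.Ico jlo.toNat i.toNat, seqA j * seqA (i.toNat - j)) :: R := by
  intro d
  induction d with
  | zero =>
    intro jlo c h1 h2 hd
    have he : jlo = i := by omega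
    subst he
    rw [PySem.List.pyRange_one_eq_nil (le_refl jlo)]
    simp
  | succ d ih =>
    intro jlo c h1 h2 hd
    have hlt : jlo < i := by omega
    rw [PySem.List.pyRange_one_cons hlt, List.foldl_cons]
    have g1 : PySem.List.pyGetD ((List.range i.toNat).map seqA ++ c :: R) i 0 = c :=
      pyGetD_mid _ _ _ _ (by omega) rfl
    have g2 : PySem.List.pyGetD ((List.range i.toNat).map seqA ++ c :: R) jlo 0 = seqA jlo.toNat :=
      pyGetD_prefix _ _ _ _ (by omega) (by omega)
    have g3 : PySem.List.pyGetD ((List.range i.toNat).map seqA ++ c :: R) (i - jlo) 0 = seqA (i - jlo).toNat :=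
      pyGetD_prefix _ _ _ _ (by omega) (by omega)
    have g4 := pySetD_mid i.toNat c (c + seqA jlo.toNat * seqA (i - jlo).toNat) R i (by omega) rfl
    simp only [g1, g2, g3, g4]
    rw [ih (jlo+1) (c + seqA jlo.toNat * seqA (i - jlo).toNat) (by omega) (by omega) (by omega)]
    have e1 : (i - jlo).toNat = i.toNat - jlo.toNat := by omega
    have e2 : (jlo + 1).toNat = jlo.toNat + 1 := by omega
    have e3 : jlo.toNat < i.toNat := by omega
    rw [e1, e2]
    rw [Finset.sum_eq_sum_Ico_succ_bot e3]
    ring_nf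

theorem conv_Ico (I : Nat) (hI : 3 ≤ I) : ∑ j ∈ Finset.Ico 1 I, seqA j * seqA (I-j) = seqA I := by
  have h := seqA_succ3 (I-3)
  have e : I-3+3 = I := by omega
  have e2 : I-3+2 = I-1 := by omega
  rw [e, e2] at h
  rw [h]
  rw [Finset.sum_Ico_eq_sum_range]
  unfold convS
  rw [show I - 1 = I - 1 from rfl]
  apply Finset.sum_congr (by congr 1)
  intro j hj
  have f2 : I - (1+j) = I - 1 - j := by omega
  have f1 : 1 + j = j + 1 := by omega
  rw [f2, f1]

theorem outer_loop (n : Int) (hn : 3 ≤ n) :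
    ∀ (d : Nat) (ilo : Int), 3 ≤ ilo → ilo ≤ n+1 → (n+1-ilo).toNat = d →
    (PySem.List.pyRange ilo (n+1) 1).foldl
      (fun dp i =>
        (PySem.List.pyRange 1 i 1).foldl
          (fun dp j => PySem.List.pySetD dp i
            (PySem.List.pyGetD dp i 0 + PySem.List.pyGetD dp j 0 * PySem.List.pyGetD dp (i-j) 0))
          dp)
      ((List.range ilo.toNat).map seqA ++ List.replicate ((n+1-ilo).toNat) 0)
    = (List.range (n.toNat+1)).map seqA := by
  intro d
  induction d with
  | zero =>
    intro ilo h3 hle hd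
    have he : ilo = n+1 := by omega
    subst he
    rw [PySem.List.pyRange_one_eq_nil (le_refl _), List.foldl_nil,
        show ((n+1-(n+1)):Int).toNat = 0 from by omega,
        show ((n+1):Int).toNat = n.toNat+1 from by omega]
    simp
  | succ d ih =>
    intro ilo h3 hle hd
    have hlt : ilo < n+1 := by omega
    rw [PySem.List.pyRange_one_cons hlt, List.foldl_cons]
    have hrep : List.replicate ((n+1-ilo).toNat) (0:Int) = 0 :: List.replicate ((n+1-(ilo+1)).toNat) 0 := by
      rw [show (n+1-ilo).toNat = ((n+1-(ilo+1)).toNat) + 1 by omega]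
      rfl
    rw [hrep]
    rw [inner_loop ilo (by omega) _ ((ilo - 1).toNat) 1 0 (by omega) (by omega) (by omega)]
    have hconv : (0:Int) + ∑ j ∈ Finset.Ico ((1:Int)).toNat ilo.toNat, seqA j * seqA (ilo.toNat - j) = seqA ilo.toNat := by
      rw [zero_add]
      exact conv_Ico ilo.toNat (by omega)
    rw [hconv]
    have hP : (List.range ilo.toNat).map seqA ++ seqA ilo.toNat :: List.replicate ((n+1-(ilo+1)).toNat) 0
        = (List.range (ilo+1).toNat).map seqA ++ List.replicate ((n+1-(ilo+1)).toNat) 0 := by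
      rw [show (ilo+1).toNat = ilo.toNat + 1 by omega, List.range_succ]
      simp
    rw [hP]
    exact ih (ilo+1) (by omega) (by omega) (by omega)

theorem init_dp (n : Int) (hn : 3 ≤ n) :
    PySem.List.pySetD (PySem.List.pySetD (PySem.List.pySetD
      ((PySem.List.pyRange 0 (n+1) 1).map (fun _ => (0:Int))) 0 1) 1 1) 2 2
    = (List.range 3).map seqA ++ List.replicate (n.toNat - 2) 0 := by
  have h1 : (PySem.List.pyRange 0 (n+1) 1).map (fun _ => (0:Int)) = List.replicate (n.toNat + 1) (0:Int) := by
    rw [PySem.List.pyRange_one, List.map_map]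
    have e : ((n+1) - 0).toNat = n.toNat + 1 := by omega
    rw [e]
    simp [Function.comp_def]
  rw [h1]
  rw [show n.toNat + 1 = 3 + (n.toNat - 2) by omega, List.replicate_add]
  have hr3 : List.replicate 3 (0:Int) = [0,0,0] := rfl
  rw [hr3]
  have s0 : PySem.List.pySetD (([0,0,0] : List Int) ++ List.replicate (n.toNat-2) 0) 0 1
      = ([1,0,0] : List Int) ++ List.replicate (n.toNat-2) 0 := by
    rw [PySem.List.pySetD_of_nonneg _ _ (by norm_num)]
    rfl
  have s1 : PySem.List.pySetD (([1,0,0] : List Int) ++ List.replicate (n.toNat-2) 0) 1 1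
      = ([1,1,0] : List Int) ++ List.replicate (n.toNat-2) 0 := by
    rw [PySem.List.pySetD_of_nonneg _ _ (by norm_num)]
    rfl
  have s2 : PySem.List.pySetD (([1,1,0] : List Int) ++ List.replicate (n.toNat-2) 0) 2 2
      = ([1,1,2] : List Int) ++ List.replicate (n.toNat-2) 0 := by
    rw [PySem.List.pySetD_of_nonneg _ _ (by norm_num)]
    rfl
  rw [s0, s1, s2]
  congr 1
  simp [show List.range 3 = [0,1,2] from rfl, seqA_zero, seqA_one, seqA_two]

theorem dps_eq_seqA (n : Int) (hn : 3 ≤ n) : dps n = seqA n.toNat := by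
  rw [dps, if_neg (by omega), if_neg (by omega)]
  simp only [init_dp n hn]
  have h0 : (List.range 3).map seqA = (List.range ((3:Int)).toNat).map seqA := rfl
  have h1 : n.toNat - 2 = (n+1-3).toNat := by omega
  rw [h0, h1, outer_loop n hn ((n-2).toNat) 3 (by omega) (by omega) (by omega)]
  rw [PySem.List.pyGetD_eq_getElem _ _ (by omega) (by simp only [List.length_map, List.length_range]; omega)]
  simp

-- ===== B-side: the linear recurrence computes seqA =====

theorem step_div (i : Int) (hi : 2 ≤ i) :
    PySem.Int.floordiv ((4*i-2)*seqA i.toNat + (4*i-8)*seqA (i.toNat - 1)) (i+1) = seqA (i.toNat + 1) := by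
  have h := seqA_rec (i.toNat - 2)
  have e3 : i.toNat - 2 + 3 = i.toNat + 1 := by omega
  have e2 : i.toNat - 2 + 2 = i.toNat := by omega
  have e1 : i.toNat - 2 + 1 = i.toNat - 1 := by omega
  have ec : ((i.toNat - 2 : Nat) : Int) = i - 2 := by omega
  rw [e3, e2, e1, ec] at h
  have hnum : (4*i-2)*seqA i.toNat + (4*i-8)*seqA (i.toNat - 1) = (i+1) * seqA (i.toNat+1) := by
    linear_combination -h
  rw [hnum, PySem.Int.floordiv_eq_ediv_of_pos (by omega)]
  rw [mul_comm, Int.mul_ediv_cancel _ (by omega)]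

theorem alt_loop (b : Int) :
    ∀ (d : Nat) (i : Int), 2 ≤ i → i ≤ b → (b - i).toNat = d →
    (PySem.List.pyRange i b 1).foldl
      (fun st k => (st.2, PySem.Int.floordiv ((4*k-2)*st.2 + (4*k-8)*st.1) (k+1)))
      (seqA (i.toNat - 1), seqA i.toNat)
    = (seqA (b.toNat - 1), seqA b.toNat) := by
  intro d
  induction d with
  | zero =>
    intro i h2 hle hd
    have he : i = b := by omega
    subst he
    rw [PySem.List.pyRange_one_eq_nil (le_refl _), List.foldl_nil]
  | succ d ih =>
    intro i h2 hle hd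
    have hlt : i < b := by omega
    rw [PySem.List.pyRange_one_cons hlt, List.foldl_cons]
    have hstep : ((seqA (i.toNat - 1), seqA i.toNat).2,
        PySem.Int.floordiv ((4*i-2)*(seqA (i.toNat - 1), seqA i.toNat).2
          + (4*i-8)*(seqA (i.toNat - 1), seqA i.toNat).1) (i+1))
        = (seqA ((i+1).toNat - 1), seqA ((i+1).toNat)) := by
      dsimp only
      rw [step_div i h2]
      rw [show (i+1).toNat - 1 = i.toNat by omega, show (i+1).toNat = i.toNat + 1 by omega]
    rw [hstep]
    exact ih (i+1) (by omega) (by omega) (by omega)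

theorem dps_alt_eq_seqA (n : Int) (hn : 3 ≤ n) : dps_alt n = seqA n.toNat := by
  rw [dps_alt, if_neg (by omega), if_neg (by omega)]
  have h0 : ((1:Int), (2:Int)) = (seqA (((2:Int)).toNat - 1), seqA ((2:Int)).toNat) := by
    simp [seqA_one, seqA_two]
  rw [h0, alt_loop n ((n-2).toNat) 2 (by omega) (by omega) (by omega)]

-- ===== VERDICT (by name: the statement is the Claim_ definition above) =====
theorem dps_spec : Claim_equal_dps := by
  unfold Claim_equal_dps
  intro n _
  unfold Spec_dps
  by_cases h0 : n = 0
  · rw [dps, dps_alt, if_pos h0, if_pos h0]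
  · by_cases h2 : n ≤ 2
    · rw [dps, dps_alt, if_neg h0, if_neg h0, if_pos h2, if_pos h2]
    · rw [dps_eq_seqA n (by omega), dps_alt_eq_seqA n (by omega)]
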